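-- pv_equiv track=rewrite | github.com/S4ND1X/365-Days-Of-Code | Day 113/houseNumberSum.py | houseNumbersSum
-- ===== SOURCE A (Python) =====
-- def houseNumbersSum(inputArray):
--         resultado = 0
--         for i in range(len(inputArray)):
--                 if inputArray[i] == 0:
--                         break
--                 else:
--                         resultado += inputArray[i]
--
--         return resultado
-- ===== SOURCE B (Python) =====
-- def houseNumbersSum(inputArray):
--     idx = inputArray.index(0) if 0 in inputArray else len(inputArray)
--     return sum(inputArray[:idx])
-- ===== Notes on version B (the rewrite author's own statement) =====
-- stated objective: simpler
-- what changed: Replaces the accumulate-with-break index loop by a two-pass boundary-then-sum shape: find the cutoff (index of first 0, or the length) and sum the prefix slice.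
import Mathlib
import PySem

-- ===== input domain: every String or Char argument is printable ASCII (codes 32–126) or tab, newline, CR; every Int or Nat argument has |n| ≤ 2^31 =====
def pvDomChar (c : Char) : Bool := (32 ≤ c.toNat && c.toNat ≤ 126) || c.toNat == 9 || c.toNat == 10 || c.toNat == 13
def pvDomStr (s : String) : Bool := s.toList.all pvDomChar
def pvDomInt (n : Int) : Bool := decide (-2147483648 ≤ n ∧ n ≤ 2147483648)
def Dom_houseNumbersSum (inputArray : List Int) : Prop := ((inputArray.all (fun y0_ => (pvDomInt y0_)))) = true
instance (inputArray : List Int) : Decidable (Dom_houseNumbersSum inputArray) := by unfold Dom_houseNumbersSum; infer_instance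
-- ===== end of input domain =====

-- B replaces A's accumulate-with-break loop by cutoff-index-then-prefix-sum (simpler decomposition).

-- ===== PORT A =====
-- A's index loop with break, as structural recursion carrying the accumulator 'resultado'
def houseNumbersSumLoop : List Int → Int → Int
  | [], resultado => resultado
  | x :: xs, resultado => if x == 0 then resultado else houseNumbersSumLoop xs (resultado + x)

def houseNumbersSum (inputArray : List Int) : Int := houseNumbersSumLoop inputArray 0

-- ===== PORT B =====
def houseNumbersSum_alt (inputArray : List Int) : Int :=
  let idx : Nat := match PySem.List.index? inputArray 0 with
    | some i => i
    | none => inputArray.length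
  (inputArray.take idx).sum

-- ===== PRECONDITION & SPEC =====
def Spec_houseNumbersSum (inputArray : List Int) (out : Int) : Prop := out = houseNumbersSum_alt inputArray
instance (inputArray : List Int) (out : Int) : Decidable (Spec_houseNumbersSum inputArray out) := by unfold Spec_houseNumbersSum; infer_instance

-- ===== CLAIM (what is proved, stated in full; the proofs are below) =====
def Claim_equal_houseNumbersSum : Prop := ∀ (inputArray : List Int), Dom_houseNumbersSum inputArray → Spec_houseNumbersSum inputArray (houseNumbersSum inputArray)

-- ===== LEMMAS AND PROOFS =====
lemma alt_cons_zero (xs : List Int) : houseNumbersSum_alt (0 :: xs) = 0 := by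
  unfold houseNumbersSum_alt
  rw [PySem.List.index?_cons_self]
  simp

lemma alt_cons_ne (x : Int) (xs : List Int) (hx : x ≠ 0) :
    houseNumbersSum_alt (x :: xs) = x + houseNumbersSum_alt xs := by
  unfold houseNumbersSum_alt
  rw [PySem.List.index?_cons_of_ne _ hx]
  cases h : PySem.List.index? xs 0 with
  | none => simp [List.take_succ_cons]
  | some i =>
      have := PySem.List.getElem_of_index?_eq_some h
      obtain ⟨hk, -, -⟩ := this
      simp [List.take_succ_cons]

lemma loop_eq (xs : List Int) (acc : Int) :
    houseNumbersSumLoop xs acc = acc + houseNumbersSum_alt xs := by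
  induction xs generalizing acc with
  | nil =>
      simp [houseNumbersSumLoop, houseNumbersSum_alt, PySem.List.index?_eq_idxOf?]
  | cons x xs ih =>
      by_cases hx : x = 0
      · subst hx
        simp [houseNumbersSumLoop, alt_cons_zero]
      · simp only [houseNumbersSumLoop]
        rw [if_neg (by simpa using hx), ih, alt_cons_ne x xs hx]
        ring

-- ===== VERDICT (by name: the statement is the Claim_ definition above) =====
theorem houseNumbersSum_spec : Claim_equal_houseNumbersSum := by
  intro l _
  unfold Spec_houseNumbersSum houseNumbersSum
  rw [loop_eq]
  ring
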